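-- pv_equiv track=rewrite | github.com/JaydenPahukula/competitive-coding | ProjectEuler/061 - Cyclical Figurate Numbers.py | findSquares
-- ===== SOURCE A (Python) =====
-- def findSquares(d:int):
--     nums = []
--     n = 0
--     while 1:
--         num = n**2
--         n += 1
--         if len(str(num)) == d:
--             nums.append(num)
--         elif len(str(num)) > d:
--             return nums
-- ===== SOURCE B (Python) =====
-- def _isqrt(m):
--     # floor square root by binary search; m >= 0
--     lo, hi = 0, m + 1
--     while hi - lo > 1:
--         mid = (lo + hi) // 2
--         if mid * mid <= m:
--             lo = mid
--         else:
--             hi = mid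
--     return lo
--
-- def findSquares(d: int):
--     if d <= 0:
--         return []
--     lo = 0 if d == 1 else _isqrt(10 ** (d - 1) - 1) + 1
--     hi = _isqrt(10 ** d - 1)
--     return [n * n for n in range(lo, hi + 1)]
-- ===== Notes on version B (the rewrite author's own statement) =====
-- stated objective: faster
-- what changed: B computes the base range analytically with a binary-search integer square root (the smallest and largest n whose square has exactly d digits) and returns the squares of one range, instead of A's scan of every consecutive square comparing len(str(n**2)) with d until it overflows d digits.
import Mathlib
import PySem

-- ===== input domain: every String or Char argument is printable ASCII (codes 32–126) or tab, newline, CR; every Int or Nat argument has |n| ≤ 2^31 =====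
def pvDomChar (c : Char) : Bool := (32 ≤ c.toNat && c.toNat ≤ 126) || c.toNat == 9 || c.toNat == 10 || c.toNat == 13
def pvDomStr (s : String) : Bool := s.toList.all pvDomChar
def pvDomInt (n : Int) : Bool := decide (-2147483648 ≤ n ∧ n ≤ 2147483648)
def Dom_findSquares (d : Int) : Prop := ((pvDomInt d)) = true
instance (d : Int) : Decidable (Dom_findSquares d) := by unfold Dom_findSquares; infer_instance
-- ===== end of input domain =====

-- B replaces A's count-up-until-overflow scan of all squares by an analytic range
-- [ceil(sqrt(10^(d-1))), isqrt(10^d-1)] computed with a binary-search integer square root (faster).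

-- ===== PORT A =====
-- len(str(num)), the digit count A tests
def pyDigits (m : Int) : Int := PySem.Str.len (PySem.Int.toStr m)

-- A's `while 1` loop; the fuel argument only makes the same computation total
-- (fuel 10^d + 1 is proved sufficient below: the loop returns before the counter reaches 10^d)
def findSquaresLoop (d : Int) (nums : List Int) (n : Nat) (fuel : Nat) : List Int :=
  match fuel with
  | 0 => nums
  | fuel + 1 =>
    let num : Int := (n : Int) ^ 2
    if pyDigits num = d then findSquaresLoop d (nums ++ [num]) (n + 1) fuel
    else if d < pyDigits num then nums
    else findSquaresLoop d nums (n + 1) fuel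

def findSquares (d : Int) : List Int := findSquaresLoop d [] 0 (10 ^ d.toNat + 1)

-- ===== PORT B =====
-- B's binary-search `while hi - lo > 1` loop; fuel (hi - lo at the call) only makes it total
def isqrtLoop (m lo hi : Int) (fuel : Nat) : Int :=
  match fuel with
  | 0 => lo
  | fuel + 1 =>
    if 1 < hi - lo then
      let mid := PySem.Int.floordiv (lo + hi) 2
      if mid * mid ≤ m then isqrtLoop m mid hi fuel else isqrtLoop m lo mid fuel
    else lo

def isqrt (m : Int) : Int := isqrtLoop m 0 (m + 1) (m + 1).toNat

def findSquares_alt (d : Int) : List Int :=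
  if d ≤ 0 then []
  else
    let lo : Int := if d = 1 then 0 else isqrt (10 ^ (d - 1).toNat - 1) + 1
    let hi : Int := isqrt (10 ^ d.toNat - 1)
    (PySem.List.pyRange lo (hi + 1) 1).map (fun n => n * n)

-- ===== PRECONDITION & SPEC =====
def Spec_findSquares (d : Int) (out : List Int) : Prop := out = findSquares_alt d
instance (d : Int) (out : List Int) : Decidable (Spec_findSquares d out) := by unfold Spec_findSquares; infer_instance

-- ===== CLAIM (what is proved, stated in full; the proofs are below) =====
def Claim_equal_findSquares : Prop := ∀ (d : Int), Dom_findSquares d → Spec_findSquares d (findSquares d)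

-- ===== LEMMAS AND PROOFS =====

theorem toDigitsCore10_length (f : Nat) : ∀ n : Nat, n < 10 ^ (f + 1) →
    (Nat.toDigitsCore 10 (f + 1) n []).length = Nat.log 10 n + 1 := by
  induction f with
  | zero =>
    intro n hn
    rw [Nat.toDigitsCore]
    rw [if_pos (Nat.div_eq_of_lt (by omega))]
    simp [Nat.log_eq_zero_iff]
    omega
  | succ f ih =>
    intro n hn
    rw [Nat.toDigitsCore]
    by_cases h : n / 10 = 0
    · rw [if_pos h]
      have hlt : n < 10 := by omega
      simp [Nat.log_eq_zero_iff, Or.inl hlt]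
    · rw [if_neg h]
      rw [Nat.toDigitsCore_lens_eq]
      have hdiv : n / 10 < 10 ^ (f + 1) := by
        have he : 10 ^ (f + 1 + 1) = 10 ^ (f + 1) * 10 := by ring
        rw [he] at hn
        exact Nat.div_lt_of_lt_mul (by omega)
      rw [ih (n / 10) hdiv]
      have h10 : 10 ≤ n := by omega
      have hdb := Nat.log_div_base 10 n
      have hpos : 1 ≤ Nat.log 10 n :=
        (Nat.le_log_iff_pow_le (by norm_num) (by omega)).mpr (by simpa using h10)
      omega

theorem toDigits10_length (n : Nat) : (Nat.toDigits 10 n).length = Nat.log 10 n + 1 := by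
  have hn : n < 10 ^ (n + 1) := by
    calc n < 2 ^ n := Nat.lt_two_pow_self
    _ ≤ 10 ^ n := Nat.pow_le_pow_left (by norm_num) n
    _ ≤ 10 ^ (n + 1) := Nat.pow_le_pow_right (by norm_num) (by omega)
  exact toDigitsCore10_length n n hn

theorem pyDigits_natCast (m : Nat) : pyDigits (m : Int) = ((Nat.log 10 m + 1 : Nat) : Int) := by
  have h : ¬ ((m : Int) < 0) := by omega
  simp [pyDigits, PySem.Str.len_eq, PySem.Int.toList_toStr, PySem.Int.toChars, h,
    toDigits10_length m]

-- cited by the A-port's decreasing_by: while its digit count stays ≤ d, the counter stays below 10^d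
theorem findSquares_counter_bound (d : Int) (n : Nat) (h : pyDigits ((n : Int) ^ 2) ≤ d) :
    n < 10 ^ d.toNat := by
  have hsq : ((n : Int)) ^ 2 = ((n ^ 2 : Nat) : Int) := by push_cast; ring
  rw [hsq, pyDigits_natCast] at h
  have hd1 : (1 : Int) ≤ d := by omega
  rcases Nat.eq_zero_or_pos n with h0 | hpos
  · subst h0
    positivity
  · have hlog : Nat.log 10 (n ^ 2) + 1 ≤ d.toNat := by omega
    have hne : n ^ 2 ≠ 0 := by positivity
    have : n ^ 2 < 10 ^ d.toNat := by
      rw [← Nat.log_lt_iff_lt_pow (by norm_num) hne]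
      omega
    nlinarith [sq_nonneg n]

theorem isqrtLoop_spec (k : Nat) : ∀ (m lo hi : Int), (hi - lo).toNat ≤ k + 1 → 0 ≤ lo → lo < hi →
    lo * lo ≤ m → m < hi * hi →
    0 ≤ isqrtLoop m lo hi k ∧ isqrtLoop m lo hi k * isqrtLoop m lo hi k ≤ m ∧
      m < (isqrtLoop m lo hi k + 1) * (isqrtLoop m lo hi k + 1) := by
  induction k with
  | zero =>
    intro m lo hi hk hlo hlt h1 h2
    have : hi = lo + 1 := by omega
    subst this
    exact ⟨hlo, h1, h2⟩
  | succ k ih =>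
    intro m lo hi hk hlo hlt h1 h2
    rw [isqrtLoop]
    by_cases hc : 1 < hi - lo
    · rw [if_pos hc]
      have hmid := PySem.Int.floordiv_eq_ediv_of_pos (a := lo + hi) (show (0:Int) < 2 by norm_num)
      dsimp only
      by_cases hm : PySem.Int.floordiv (lo + hi) 2 * PySem.Int.floordiv (lo + hi) 2 ≤ m
      · rw [if_pos hm]
        exact ih m _ hi (by omega) (by omega) (by omega) hm h2
      · rw [if_neg hm]
        exact ih m lo _ (by omega) hlo (by omega) h1 (by omega)
    · rw [if_neg hc]
      have : hi = lo + 1 := by omega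
      subst this
      exact ⟨hlo, h1, h2⟩

theorem isqrt_spec (m : Int) (hm : 0 ≤ m) :
    0 ≤ isqrt m ∧ isqrt m * isqrt m ≤ m ∧ m < (isqrt m + 1) * (isqrt m + 1) := by
  rw [isqrt]
  exact isqrtLoop_spec (m + 1).toNat m 0 (m + 1) (by omega) le_rfl (by omega) (by omega)
    (by nlinarith)

theorem pow_ten_pos (e : Nat) : (1:Int) ≤ 10 ^ e := one_le_pow₀ (by norm_num)

-- pyDigits (n²) ≤ d ↔ n ≤ isqrt (10^d − 1)
theorem digits_le_iff (d : Int) (hd : 1 ≤ d) (n : Nat) :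
    pyDigits ((n : Int) ^ 2) ≤ d ↔ (n : Int) ≤ isqrt (10 ^ d.toNat - 1) := by
  obtain ⟨hH0, hH1, hH2⟩ := isqrt_spec (10 ^ d.toNat - 1) (by have := pow_ten_pos d.toNat; omega)
  set H := isqrt (10 ^ d.toNat - 1) with hH
  rw [show ((n : Int)) ^ 2 = ((n ^ 2 : Nat) : Int) by push_cast; ring, pyDigits_natCast]
  have hcast : ((10 ^ d.toNat : Nat) : Int) = 10 ^ d.toNat := by push_cast; ring
  have step1 : (((Nat.log 10 (n ^ 2) + 1 : Nat) : Int) ≤ d) ↔ n ^ 2 < 10 ^ d.toNat := by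
    rcases Nat.eq_zero_or_pos n with h0 | hpos
    · subst h0
      have hl : ((Nat.log 10 (0 ^ 2) + 1 : Nat) : Int) = 1 := by norm_num
      rw [hl]
      have hp : 0 < 10 ^ d.toNat := Nat.pow_pos (by norm_num)
      constructor
      · intro _
        have h02 : (0 : Nat) ^ 2 = 0 := by norm_num
        omega
      · intro _; omega
    · have hne : n ^ 2 ≠ 0 := by positivity
      rw [← Nat.log_lt_iff_lt_pow (by norm_num) hne]
      omega
  rw [step1]
  constructor
  · intro hlt
    by_contra hgt
    push Not at hgt
    have h1 : H + 1 ≤ (n : Int) := by omega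
    have h2 : ((n ^ 2 : Nat) : Int) < ((10 ^ d.toNat : Nat) : Int) := by exact_mod_cast hlt
    rw [hcast] at h2
    have h3 : (H + 1) * (H + 1) ≤ (n : Int) * (n : Int) := by nlinarith
    have h4 : ((n ^ 2 : Nat) : Int) = (n : Int) * (n : Int) := by push_cast; ring
    omega
  · intro hle
    have h3 : (n : Int) * (n : Int) ≤ H * H := by nlinarith [Int.natCast_nonneg n]
    have h4 : ((n ^ 2 : Nat) : Int) = (n : Int) * (n : Int) := by push_cast; ring
    have : ((n ^ 2 : Nat) : Int) < ((10 ^ d.toNat : Nat) : Int) := by rw [hcast]; omega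
    exact_mod_cast this

-- the lower cut of B: d ≤ pyDigits (n²) ↔ lo ≤ n
theorem digits_ge_iff (d : Int) (hd : 1 ≤ d) (n : Nat) :
    d ≤ pyDigits ((n : Int) ^ 2) ↔
      (if d = 1 then 0 else isqrt (10 ^ (d - 1).toNat - 1) + 1) ≤ (n : Int) := by
  rw [show ((n : Int)) ^ 2 = ((n ^ 2 : Nat) : Int) by push_cast; ring, pyDigits_natCast]
  by_cases h1 : d = 1
  · subst h1
    rw [if_pos rfl]
    constructor
    · intro _; exact Int.natCast_nonneg n
    · intro _; push_cast; omega
  · rw [if_neg h1]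
    have hd2 : 2 ≤ d := by omega
    obtain ⟨hS0, hS1, hS2⟩ :=
      isqrt_spec (10 ^ (d - 1).toNat - 1) (by have := pow_ten_pos (d - 1).toNat; omega)
    set S := isqrt (10 ^ (d - 1).toNat - 1) with hS
    have hcast : ((10 ^ (d - 1).toNat : Nat) : Int) = 10 ^ (d - 1).toNat := by push_cast; ring
    have step1 : (d ≤ ((Nat.log 10 (n ^ 2) + 1 : Nat) : Int)) ↔ 10 ^ (d - 1).toNat ≤ n ^ 2 := by
      rcases Nat.eq_zero_or_pos n with h0 | hpos
      · subst h0
        have hl : ((Nat.log 10 (0 ^ 2) + 1 : Nat) : Int) = 1 := by norm_num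
        rw [hl]
        have hp : 0 < 10 ^ (d - 1).toNat := Nat.pow_pos (by norm_num)
        have h02 : (0 : Nat) ^ 2 = 0 := by norm_num
        constructor
        · intro h; exfalso; omega
        · intro h; exfalso; omega
      · have hne : n ^ 2 ≠ 0 := by positivity
        rw [← Nat.le_log_iff_pow_le (by norm_num) hne]
        omega
    rw [step1]
    constructor
    · intro hle
      by_contra hgt
      push Not at hgt
      have h3 : (n : Int) ≤ S := by omega
      have h4 : (n : Int) * (n : Int) ≤ S * S := by nlinarith [Int.natCast_nonneg n]
      have h5 : ((10 ^ (d - 1).toNat : Nat) : Int) ≤ ((n ^ 2 : Nat) : Int) := by exact_mod_cast hle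
      rw [hcast] at h5
      have h6 : ((n ^ 2 : Nat) : Int) = (n : Int) * (n : Int) := by push_cast; ring
      omega
    · intro hle
      have h3 : S + 1 ≤ (n : Int) := hle
      have h4 : (S + 1) * (S + 1) ≤ (n : Int) * (n : Int) := by nlinarith
      have h6 : ((n ^ 2 : Nat) : Int) = (n : Int) * (n : Int) := by push_cast; ring
      have : ((10 ^ (d - 1).toNat : Nat) : Int) ≤ ((n ^ 2 : Nat) : Int) := by rw [hcast]; omega
      exact_mod_cast this

theorem findSquaresLoop_eq (d : Int) (hd : 1 ≤ d) (fuel : Nat) :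
    ∀ (n : Nat) (nums : List Int), 10 ^ d.toNat - n < fuel →
    findSquaresLoop d nums n fuel =
      nums ++ ((PySem.List.pyRange
        (max (n : Int) (if d = 1 then 0 else isqrt (10 ^ (d - 1).toNat - 1) + 1))
        (isqrt (10 ^ d.toNat - 1) + 1) 1).map (fun j => j * j)) := by
  induction fuel with
  | zero => intro n nums hk; omega
  | succ fuel ih =>
    intro n nums hk
    rw [findSquaresLoop]
    by_cases hgt : d < pyDigits ((n : Int) ^ 2)
    · rw [if_neg (by omega), if_pos hgt]
      have hHn : isqrt (10 ^ d.toNat - 1) < (n : Int) := by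
        by_contra h
        push Not at h
        exact absurd ((digits_le_iff d hd n).mpr h) (by omega)
      rw [PySem.List.pyRange_one_eq_nil
        (by have := le_max_left ((n : Int)) (if d = 1 then 0 else isqrt (10 ^ (d - 1).toNat - 1) + 1); omega)]
      simp
    · have hle : pyDigits ((n : Int) ^ 2) ≤ d := by omega
      have hnH : (n : Int) ≤ isqrt (10 ^ d.toNat - 1) := (digits_le_iff d hd n).mp hle
      have hlt10 := findSquares_counter_bound d n hle
      by_cases heq : pyDigits ((n : Int) ^ 2) = d
      · rw [if_pos heq]
        have hLn : (if d = 1 then 0 else isqrt (10 ^ (d - 1).toNat - 1) + 1) ≤ (n : Int) :=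
          (digits_ge_iff d hd n).mp (le_of_eq heq.symm)
        rw [ih (n + 1) (nums ++ [(n : Int) ^ 2]) (by omega)]
        have hm1 : max ((n + 1 : Nat) : Int) (if d = 1 then 0 else isqrt (10 ^ (d - 1).toNat - 1) + 1)
            = ((n + 1 : Nat) : Int) := max_eq_left (by push_cast; omega)
        have hm2 : max ((n : Nat) : Int) (if d = 1 then 0 else isqrt (10 ^ (d - 1).toNat - 1) + 1)
            = ((n : Nat) : Int) := max_eq_left hLn
        rw [hm1, hm2, PySem.List.pyRange_one_cons (show (n : Int) < isqrt (10 ^ d.toNat - 1) + 1 by omega)]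
        push_cast
        rw [show ((n : Int)) ^ 2 = (n : Int) * (n : Int) by ring]
        simp
      · rw [if_neg heq, if_neg hgt]
        have hnL : ¬ ((if d = 1 then 0 else isqrt (10 ^ (d - 1).toNat - 1) + 1) ≤ (n : Int)) := by
          intro hL
          exact heq (le_antisymm hle ((digits_ge_iff d hd n).mpr hL))
        rw [ih (n + 1) nums (by omega)]
        have hm1 : max ((n + 1 : Nat) : Int) (if d = 1 then 0 else isqrt (10 ^ (d - 1).toNat - 1) + 1)
            = (if d = 1 then 0 else isqrt (10 ^ (d - 1).toNat - 1) + 1) := max_eq_right (by push_cast; omega)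
        have hm2 : max ((n : Nat) : Int) (if d = 1 then 0 else isqrt (10 ^ (d - 1).toNat - 1) + 1)
            = (if d = 1 then 0 else isqrt (10 ^ (d - 1).toNat - 1) + 1) := max_eq_right (by omega)
        rw [hm1, hm2]

theorem findSquares_spec' (d : Int) : findSquares d = findSquares_alt d := by
  by_cases hd : d ≤ 0
  · rw [findSquares, findSquaresLoop]
    have h0 : pyDigits (((0 : Nat) : Int) ^ 2) = 1 := by decide
    rw [if_neg (by omega), if_pos (by omega)]
    rw [findSquares_alt, if_pos hd]
  · have hd1 : 1 ≤ d := by omega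
    rw [findSquares, findSquaresLoop_eq d hd1 (10 ^ d.toNat + 1) 0 [] (Nat.sub_lt_succ _ _)]
    rw [findSquares_alt, if_neg hd]
    dsimp only
    have hL0 : (0 : Int) ≤ (if d = 1 then 0 else isqrt (10 ^ (d - 1).toNat - 1) + 1) := by
      by_cases h1 : d = 1
      · rw [if_pos h1]
      · rw [if_neg h1]
        have := (isqrt_spec (10 ^ (d - 1).toNat - 1) (by have := pow_ten_pos (d - 1).toNat; omega)).1
        omega
    rw [show max (((0 : Nat)) : Int) (if d = 1 then 0 else isqrt (10 ^ (d - 1).toNat - 1) + 1)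
        = (if d = 1 then 0 else isqrt (10 ^ (d - 1).toNat - 1) + 1) from max_eq_right (by push_cast; omega)]
    simp

-- ===== VERDICT (by name: the statement is the Claim_ definition above) =====
theorem findSquares_spec : Claim_equal_findSquares := by
  intro d _
  unfold Spec_findSquares
  exact findSquares_spec' d
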